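-- pv_equiv track=rewrite | github.com/sheryllan/Algo | DoublePointers/biological_hazard/biological_hazard.py | get_num_intervals
-- ===== SOURCE A (Python) =====
-- def get_num_intervals(n: int, allergic: list, poisonous: list):
--     #  construct the dict which stores the min hazardous bacteria seen after the given bacteria
--     hazards = {}
--     for allergic_bacteria, poisonous_bacteria in zip(allergic, poisonous):
--         smaller, bigger = allergic_bacteria, poisonous_bacteria
--         if smaller > bigger:
--             smaller, bigger = bigger, smaller
--
--         if smaller not in hazards:
--             hazards[smaller] = bigger
--         else:
--             hazards[smaller] = min(hazards[smaller], bigger)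
--
--     """
--     The hazards dict only stores constraints for the smaller bacteria of each pair.
--     It doesn't account for the fact that a constraint on position j > i limits what intervals starting at i can include.
--     Here is the wrong solution below:
--     """
--     # total = 0
--     # for i in range(1, n + 1):
--     #     last = hazards.get(i, n + 1) - i
--     #     total += last
--
--     # The fix requires propagating the minimum right boundary forward:
--     total = 0
--     limit = n + 1
--     for i in range(n, 0, -1):
--         if i in hazards:
--             limit = min(limit, hazards[i])
--         # intervals starting at i can reach at most limit-1
--         total += limit - i
--
--     return total
-- ===== SOURCE B (Python) =====
-- def get_num_intervals(n: int, allergic: list, poisonous: list):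
--     # Same constraint dict, but the countdown over every i in [1, n] is replaced by a
--     # descending walk over the constraint keys only, summing each constant-limit
--     # segment with a closed-form arithmetic-series formula.
--     hazards = {}
--     for a, p in zip(allergic, poisonous):
--         s, b = (a, p) if a <= p else (p, a)
--         if s in hazards:
--             hazards[s] = min(hazards[s], b)
--         else:
--             hazards[s] = b
--
--     if n <= 0:
--         return 0
--     keys = sorted([k for k in hazards if 1 <= k <= n], reverse=True)
--     total = 0
--     lim = n + 1
--     hi = n
--     for k in keys:
--         # starting positions k+1 .. hi all see the current limit `lim`
--         cnt = hi - k
--         total += lim * cnt - (hi + k + 1) * cnt // 2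
--         lim = min(lim, hazards[k])
--         hi = k
--     # remaining starting positions 1 .. hi
--     total += lim * hi - (hi + 1) * hi // 2
--     return total
-- ===== Notes on version B (the rewrite author's own statement) =====
-- stated objective: alternative
-- what changed: A scans every start position i = n..1 updating a running limit; B sorts the relevant constraint keys descending and sums each constant-limit stretch of start positions with a closed-form arithmetic-series formula, so the loop runs over the sorted keys instead of over all positions.
import Mathlib
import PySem

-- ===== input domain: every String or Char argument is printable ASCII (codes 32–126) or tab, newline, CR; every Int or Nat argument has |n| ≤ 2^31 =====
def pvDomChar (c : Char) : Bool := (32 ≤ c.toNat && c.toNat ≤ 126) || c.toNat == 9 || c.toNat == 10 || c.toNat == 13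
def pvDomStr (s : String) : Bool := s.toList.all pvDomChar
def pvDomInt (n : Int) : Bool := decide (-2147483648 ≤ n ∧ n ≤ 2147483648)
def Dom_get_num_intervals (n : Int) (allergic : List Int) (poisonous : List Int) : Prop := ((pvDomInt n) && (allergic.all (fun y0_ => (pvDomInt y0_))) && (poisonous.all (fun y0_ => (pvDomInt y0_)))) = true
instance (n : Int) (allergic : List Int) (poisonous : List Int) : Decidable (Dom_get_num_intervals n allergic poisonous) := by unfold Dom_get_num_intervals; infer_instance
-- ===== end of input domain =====

-- B replaces A's per-position countdown by a descending walk over the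
-- constraint keys only, summing each constant-limit segment by a closed-form series.

-- ===== PORT A =====
def get_num_intervals (n : Int) (allergic : List Int) (poisonous : List Int) : Int :=
  let hazards : PySem.Dict Int Int :=
    (List.zip allergic poisonous).foldl (fun h ap =>
      let smaller := if ap.1 > ap.2 then ap.2 else ap.1
      let bigger  := if ap.1 > ap.2 then ap.1 else ap.2
      if h.contains smaller = false then h.insert smaller bigger
      else h.insert smaller (min (h.getD smaller 0) bigger)) PySem.Dict.empty
  let st := (PySem.List.pyRange n 0 (-1)).foldl (fun (st : Int × Int) i =>
      let limit := if hazards.contains i then min st.2 (hazards.getD i 0) else st.2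
      (st.1 + (limit - i), limit)) (0, n + 1)
  st.1

-- ===== PORT B =====
def get_num_intervals_alt (n : Int) (allergic : List Int) (poisonous : List Int) : Int :=
  let hazards : PySem.Dict Int Int :=
    (List.zip allergic poisonous).foldl (fun h ap =>
      let s := if ap.1 ≤ ap.2 then ap.1 else ap.2
      let b := if ap.1 ≤ ap.2 then ap.2 else ap.1
      if h.contains s then h.insert s (min (h.getD s 0) b)
      else h.insert s b) PySem.Dict.empty
  if n ≤ 0 then 0
  else
    let keys := PySem.List.sorted (hazards.keys.filter (fun k => decide (1 ≤ k) && decide (k ≤ n))) (fun x => x) true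
    let st := keys.foldl (fun (st : Int × Int × Int) k =>
        let cnt := st.2.2 - k
        (st.1 + st.2.1 * cnt - PySem.Int.floordiv ((st.2.2 + k + 1) * cnt) 2,
         min st.2.1 (hazards.getD k 0), k)) (0, n + 1, n)
    st.1 + st.2.1 * st.2.2 - PySem.Int.floordiv ((st.2.2 + 1) * st.2.2) 2

-- ===== PRECONDITION & SPEC =====
def Spec_get_num_intervals (n : Int) (allergic : List Int) (poisonous : List Int) (out : Int) : Prop := out = get_num_intervals_alt n allergic poisonous
instance (n : Int) (allergic : List Int) (poisonous : List Int) (out : Int) : Decidable (Spec_get_num_intervals n allergic poisonous out) := by unfold Spec_get_num_intervals; infer_instance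

-- ===== CLAIM (what is proved, stated in full; the proofs are below) =====
def Claim_equal_get_num_intervals : Prop := ∀ (n : Int) (allergic : List Int) (poisonous : List Int), Dom_get_num_intervals n allergic poisonous → Spec_get_num_intervals n allergic poisonous (get_num_intervals n allergic poisonous)


-- ===== LEMMAS AND PROOFS =====

-- Proof helpers: named forms of the two loop bodies and B's final expression.
def pvStepA (d : PySem.Dict Int Int) : Int × Int → Int → Int × Int :=
  fun st i =>
    let limit := if d.contains i then min st.2 (d.getD i 0) else st.2
    (st.1 + (limit - i), limit)

def pvStepB (d : PySem.Dict Int Int) : Int × Int × Int → Int → Int × Int × Int :=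
  fun st k =>
    let cnt := st.2.2 - k
    (st.1 + st.2.1 * cnt - PySem.Int.floordiv ((st.2.2 + k + 1) * cnt) 2,
     min st.2.1 (d.getD k 0), k)

def pvFinB (st : Int × Int × Int) : Int :=
  st.1 + st.2.1 * st.2.2 - PySem.Int.floordiv ((st.2.2 + 1) * st.2.2) 2

def pvBuildA (allergic poisonous : List Int) : PySem.Dict Int Int :=
  (List.zip allergic poisonous).foldl (fun h ap =>
      let smaller := if ap.1 > ap.2 then ap.2 else ap.1
      let bigger  := if ap.1 > ap.2 then ap.1 else ap.2
      if h.contains smaller = false then h.insert smaller bigger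
      else h.insert smaller (min (h.getD smaller 0) bigger)) PySem.Dict.empty

def pvBuildB (allergic poisonous : List Int) : PySem.Dict Int Int :=
  (List.zip allergic poisonous).foldl (fun h ap =>
      let s := if ap.1 ≤ ap.2 then ap.1 else ap.2
      let b := if ap.1 ≤ ap.2 then ap.2 else ap.1
      if h.contains s then h.insert s (min (h.getD s 0) b)
      else h.insert s b) PySem.Dict.empty

def pvKeys (n : Int) (allergic poisonous : List Int) : List Int :=
  PySem.List.sorted ((pvBuildB allergic poisonous).keys.filter
    (fun k => decide (1 ≤ k) && decide (k ≤ n))) (fun x => x) true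

theorem pvA_eq (n : Int) (al po : List Int) :
    get_num_intervals n al po
      = ((PySem.List.pyRange n 0 (-1)).foldl (pvStepA (pvBuildA al po)) (0, n + 1)).1 := rfl

theorem pvB_eq (n : Int) (al po : List Int) :
    get_num_intervals_alt n al po
      = if n ≤ 0 then 0
        else pvFinB ((pvKeys n al po).foldl (pvStepB (pvBuildB al po)) (0, n + 1, n)) := rfl

theorem pvBuild_eq (al po : List Int) : pvBuildA al po = pvBuildB al po := by
  unfold pvBuildA pvBuildB
  congr 1
  funext h ap
  dsimp only
  rcases le_or_gt ap.1 ap.2 with hle | hlt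
  · rw [if_neg (not_lt.mpr hle), if_neg (not_lt.mpr hle), if_pos hle, if_pos hle]
    by_cases hc : h.contains ap.1
    · rw [if_neg (by simp [hc]), if_pos hc]
    · rw [if_pos (by simp [hc]), if_neg hc]
  · rw [if_pos hlt, if_pos hlt, if_neg (not_le.mpr hlt), if_neg (not_le.mpr hlt)]
    by_cases hc : h.contains ap.2
    · rw [if_neg (by simp [hc]), if_pos hc]
    · rw [if_pos (by simp [hc]), if_neg hc]

theorem pvBuildB_nodup (al po : List Int) : (pvBuildB al po).keys.Nodup := by
  have he : pvBuildB al po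
      = (List.zip al po).foldl (fun h ap =>
          h.insert (if ap.1 ≤ ap.2 then ap.1 else ap.2)
            (if h.contains (if ap.1 ≤ ap.2 then ap.1 else ap.2)
             then min (h.getD (if ap.1 ≤ ap.2 then ap.1 else ap.2) 0)
                      (if ap.1 ≤ ap.2 then ap.2 else ap.1)
             else (if ap.1 ≤ ap.2 then ap.2 else ap.1))) PySem.Dict.empty := by
    unfold pvBuildB
    congr 1
    funext h ap
    dsimp only
    split_ifs <;> rfl
  rw [he]
  exact PySem.Dict.nodup_keys_foldl_insert_key _ _ _ _ PySem.Dict.nodup_keys_empty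


-- exact floor division: a = b + h*2 gives a//2 = b//2 + h
theorem pvFdivShift (a b h : Int) (hab : a = b + h * 2) :
    PySem.Int.floordiv a 2 = PySem.Int.floordiv b 2 + h := by
  rw [PySem.Int.floordiv_eq_ediv_of_pos (by norm_num),
      PySem.Int.floordiv_eq_ediv_of_pos (by norm_num), hab,
      Int.add_mul_ediv_right _ _ (by norm_num : (2:Int) ≠ 0)]

-- A's countdown over a key-free stretch (b, hi] adds the arithmetic series in closed form.
theorem pvSegA (d : PySem.Dict Int Int) :
    ∀ (m : Nat) (hi b total lim : Int), (hi - b).toNat = m → 0 ≤ b → b ≤ hi →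
    (∀ i, b < i → i ≤ hi → d.contains i = false) →
    (PySem.List.pyRange hi b (-1)).foldl (pvStepA d) (total, lim)
      = (total + lim * (hi - b) - PySem.Int.floordiv ((hi + b + 1) * (hi - b)) 2, lim) := by
  intro m
  induction m with
  | zero =>
      intro hi b total lim hm hb hbe hc
      have hbb : hi = b := by omega
      subst hbb
      rw [PySem.List.pyRange_neg_one_eq_nil le_rfl]
      have h0 : hi - hi = (0 : Int) := by ring
      rw [List.foldl_nil, h0, mul_zero, mul_zero,
          PySem.Int.floordiv_eq_ediv_of_pos (by norm_num), Int.zero_ediv]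
      norm_num
  | succ m ih =>
      intro hi b total lim hm hb hbe hc
      have hlt : b < hi := by omega
      rw [PySem.List.pyRange_neg_one_cons hlt, List.foldl_cons]
      have hstep : pvStepA d (total, lim) hi = (total + (lim - hi), lim) := by
        simp [pvStepA, hc hi hlt le_rfl]
      rw [hstep, ih (hi - 1) b (total + (lim - hi)) lim (by omega) hb (by omega)
            (fun i h1 h2 => hc i h1 (by omega))]
      have key := pvFdivShift ((hi + b + 1) * (hi - b)) ((hi - 1 + b + 1) * (hi - 1 - b)) hi
        (by ring)
      rw [Prod.ext_iff]
      refine ⟨?_, rfl⟩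
      simp only [key]
      ring

-- Peeling the top start position out of B's pending segment does not change the outcome.
theorem pvPeel (d : PySem.Dict Int Int) (ks : List Int) (total lim hi : Int) :
    pvFinB (ks.foldl (pvStepB d) (total + (lim - hi), lim, hi - 1))
      = pvFinB (ks.foldl (pvStepB d) (total, lim, hi)) := by
  cases ks with
  | nil =>
      simp only [List.foldl_nil, pvFinB]
      have key := pvFdivShift ((hi + 1) * hi) ((hi - 1 + 1) * (hi - 1)) hi (by ring)
      rw [key]
      ring
  | cons k rest =>
      rw [List.foldl_cons, List.foldl_cons]
      have hst : pvStepB d (total + (lim - hi), lim, hi - 1) k = pvStepB d (total, lim, hi) k := by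
        simp only [pvStepB]
        have key := pvFdivShift ((hi + k + 1) * (hi - k)) ((hi - 1 + k + 1) * (hi - 1 - k)) hi
          (by ring)
        rw [Prod.ext_iff]
        refine ⟨?_, rfl⟩
        simp only [key]
        ring
      rw [hst]

-- Main loop correspondence: A's full countdown equals B's walk over the descending keys.
theorem pvMain (d : PySem.Dict Int Int) :
    ∀ (ks : List Int), ks.Pairwise (· > ·) →
    ∀ (hi total lim : Int), 0 ≤ hi → (∀ k ∈ ks, 1 ≤ k ∧ k ≤ hi) →
    (∀ i : Int, 1 ≤ i → i ≤ hi → (d.contains i = true ↔ i ∈ ks)) →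
    ((PySem.List.pyRange hi 0 (-1)).foldl (pvStepA d) (total, lim)).1
      = pvFinB (ks.foldl (pvStepB d) (total, lim, hi)) := by
  intro ks
  induction ks with
  | nil =>
      intro _ hi total lim hhi hmem hchar
      have hfree : ∀ i : Int, 0 < i → i ≤ hi → d.contains i = false := by
        intro i h1 h2
        have := hchar i h1 h2
        simp at this
        exact this
      rw [pvSegA d (hi - 0).toNat hi 0 total lim rfl le_rfl hhi hfree]
      simp only [List.foldl_nil, pvFinB]
      have e : (hi + 0 + 1) * (hi - 0) = (hi + 1) * hi := by ring
      rw [e]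
      ring
  | cons k rest ih =>
      intro hp hi total lim hhi hmem hchar
      have hpk : ∀ x ∈ rest, x < k := fun x hx => (List.pairwise_cons.mp hp).1 x hx
      have hk1 : 1 ≤ k := (hmem k (List.mem_cons_self)).1
      have hkhi : k ≤ hi := (hmem k (List.mem_cons_self)).2
      have hsplit : PySem.List.pyRange hi 0 (-1)
          = PySem.List.pyRange hi k (-1) ++ PySem.List.pyRange k 0 (-1) := by
        rw [PySem.List.pyRange_neg_one_eq_reverse, PySem.List.pyRange_neg_one_eq_reverse,
            PySem.List.pyRange_neg_one_eq_reverse, ← List.reverse_append,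
            ← PySem.List.pyRange_one_append (0 + 1) (k + 1) (hi + 1) (by omega) (by omega)]
      have hfree : ∀ i : Int, k < i → i ≤ hi → d.contains i = false := by
        intro i h1 h2
        have hiff := hchar i (by omega) h2
        by_contra hcc
        have hmemi : i ∈ k :: rest := hiff.mp (by simpa using hcc)
        rcases List.mem_cons.mp hmemi with h | h
        · omega
        · exact absurd (hpk i h) (by omega)
      have hck : d.contains k = true := (hchar k hk1 hkhi).mpr List.mem_cons_self
      rw [hsplit, List.foldl_append,
          pvSegA d (hi - k).toNat hi k total lim rfl (by omega) hkhi hfree,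
          PySem.List.pyRange_neg_one_cons (show (0:Int) < k by omega), List.foldl_cons]
      have hstep : pvStepA d
          (total + lim * (hi - k) - PySem.Int.floordiv ((hi + k + 1) * (hi - k)) 2, lim) k
          = (total + lim * (hi - k) - PySem.Int.floordiv ((hi + k + 1) * (hi - k)) 2
               + (min lim (d.getD k 0) - k), min lim (d.getD k 0)) := by
        simp [pvStepA, hck]
      rw [hstep,
          ih (List.Pairwise.of_cons hp) (k - 1) _ _ (by omega)
            (fun x hx => ⟨(hmem x (List.mem_cons_of_mem _ hx)).1, by
              have := hpk x hx; omega⟩)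
            (fun i h1 h2 => by
              have hiff := hchar i h1 (by omega)
              rw [hiff, List.mem_cons]
              constructor
              · rintro (h | h)
                · omega
                · exact h
              · exact fun h => Or.inr h),
          List.foldl_cons]
      have hstB : pvStepB d (total, lim, hi) k
          = (total + lim * (hi - k) - PySem.Int.floordiv ((hi + k + 1) * (hi - k)) 2,
             min lim (d.getD k 0), k) := rfl
      rw [hstB]
      exact pvPeel d rest _ (min lim (d.getD k 0)) k


-- ===== VERDICT (by name: the statement is the Claim_ definition above) =====
theorem get_num_intervals_spec : Claim_equal_get_num_intervals := by
  intro n al po _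
  unfold Spec_get_num_intervals
  rw [pvA_eq, pvB_eq, pvBuild_eq]
  by_cases hn : n ≤ 0
  · rw [if_pos hn, PySem.List.pyRange_neg_one_eq_nil hn]
    rfl
  · rw [if_neg hn]
    refine pvMain (pvBuildB al po) (pvKeys n al po) ?_ n 0 (n + 1) (by omega) ?_ ?_
    · have hnd : (pvKeys n al po).Nodup :=
        ((PySem.List.sorted_perm _ _ _).nodup_iff).mpr
          (List.Nodup.filter _ (pvBuildB_nodup al po))
      have hge := PySem.List.sorted_pairwise_rev
        ((pvBuildB al po).keys.filter (fun k => decide (1 ≤ k) && decide (k ≤ n))) (fun x => x)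
      exact (hge.and hnd).imp (fun h => lt_of_le_of_ne h.1 (fun he => h.2 he.symm))
    · intro k hk
      unfold pvKeys at hk
      rw [PySem.List.mem_sorted, List.mem_filter] at hk
      have := hk.2
      simp only [Bool.and_eq_true, decide_eq_true_eq] at this
      exact this
    · intro i h1 h2
      unfold pvKeys
      rw [PySem.List.mem_sorted, List.mem_filter,
          PySem.Dict.contains_iff_mem_keys]
      simp only [Bool.and_eq_true, decide_eq_true_eq]
      constructor
      · exact fun h => ⟨h, h1, h2⟩
      · exact fun h => h.1
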